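-- pv_equiv track=rewrite | github.com/ptiger10/education-data-transformation | TX_report_generator.py | transform_column_years_in_codes
-- ===== SOURCE A (Python) =====
-- def transform_column_years_in_codes(base_list, years):
--     """
--     inputs: code string with an embedded year at a specific position; list of years
--     output: new code string with the year altered
--     notes: the location of the alteration depends on the length of each code string
--
--     params:
--         - codes (df): table with a column entitled 'DISTRICT' containing all the codes for transformation
--         - years (list): list of year strings in 'YY' format to be altered within the base list; can be empty
--     """
--     master_list = []
--     master_list.extend(base_list)
--     for year in years:
--         if len(base_list[0])==12:
--             new_list = [elem[0:9]+year+elem[11] if elem[9:10].isdigit() else elem for elem in base_list]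
--
--         if len(base_list[0])==8:
--             new_list = [elem[0:5]+year+elem[7] if elem[5:6].isdigit() and 'DPETG' not in elem                             else elem for elem in base_list]
--
--         master_list.extend(new_list)
--
--     return master_list
-- ===== SOURCE B (Python) =====
-- def transform_column_years_in_codes(base_list, years):
--     # Element-major: build one column of year-variants per code, then transpose.
--     if not years:
--         return list(base_list)
--     n = len(base_list[0])
--     if n not in (8, 12):
--         raise ValueError("unsupported code length: %d" % n)
--     cols = []
--     for e in base_list:
--         if n == 12 and e[9:10].isdigit():
--             cols.append([e[0:9] + y + e[11] for y in years])
--         elif n == 8 and e[5:6].isdigit() and 'DPETG' not in e: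
--             cols.append([e[0:5] + y + e[7] for y in years])
--         else:
--             cols.append([e] * len(years))
--     return list(base_list) + [s for row in zip(*cols) for s in row]
-- ===== Notes on version B (the rewrite author's own statement) =====
-- stated objective: alternative
-- what changed: B traverses element-major, building for each code one column of all its year-variants (eligibility and slices computed once per element), then transposes the columns with zip(*cols) to recover A's year-major block order, instead of A's per-year passes over the whole list.
import Mathlib
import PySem

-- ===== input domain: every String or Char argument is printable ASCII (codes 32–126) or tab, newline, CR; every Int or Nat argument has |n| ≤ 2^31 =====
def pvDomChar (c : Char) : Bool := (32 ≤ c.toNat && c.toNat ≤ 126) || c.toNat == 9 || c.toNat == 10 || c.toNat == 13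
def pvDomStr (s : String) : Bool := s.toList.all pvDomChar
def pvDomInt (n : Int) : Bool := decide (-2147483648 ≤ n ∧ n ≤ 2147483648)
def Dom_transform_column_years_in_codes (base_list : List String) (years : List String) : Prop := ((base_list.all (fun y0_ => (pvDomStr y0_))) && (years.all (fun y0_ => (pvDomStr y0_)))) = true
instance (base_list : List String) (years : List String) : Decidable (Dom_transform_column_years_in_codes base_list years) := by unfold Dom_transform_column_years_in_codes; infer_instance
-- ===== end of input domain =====

-- B traverses element-major — one column of all year-variants per code, eligibility tested once —
-- then transposes (zip(*cols)) back to A's year-major block order (alternative decomposition, same cost).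

-- ===== PORT A =====
def transform_column_years_in_codes (base_list : List String) (years : List String) : List String :=
  let master_list : List String := [] ++ base_list
  let res := years.foldl (fun (st : List String × Option (List String)) year =>
    let new_list := st.2
    let new_list := if (PySem.List.pyGet? base_list 0).map PySem.Str.len = some 12 then
        some (base_list.map (fun elem =>
          if PySem.Str.strIsdigit (PySem.Str.slice elem (some 9) (some 10)) then
            PySem.Str.join "" [PySem.Str.slice elem (some 0) (some 9), year,
              String.ofList [(PySem.Str.pyGet? elem 11).getD ' ']]   -- elem[11]; none = IndexError, outside Pre_
          else elem))
      else new_list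
    let new_list := if (PySem.List.pyGet? base_list 0).map PySem.Str.len = some 8 then
        some (base_list.map (fun elem =>
          if PySem.Str.strIsdigit (PySem.Str.slice elem (some 5) (some 6)) && !(PySem.Str.isIn "DPETG" elem) then
            PySem.Str.join "" [PySem.Str.slice elem (some 0) (some 5), year,
              String.ofList [(PySem.Str.pyGet? elem 7).getD ' ']]    -- elem[7]; none = IndexError, outside Pre_
          else elem))
      else new_list
    (st.1 ++ new_list.getD [], new_list))    -- new_list = none models the NameError path, outside Pre_
    (master_list, none)
  res.1

-- ===== PORT B =====
-- zip(*cols): rows until the shortest column is exhausted; fuel bounds the recursion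
-- (B calls it with fuel = |years| = the exact length of every column, so it is exact there).
def pyZipStar : Nat → List (List String) → List (List String)
  | 0, _ => []
  | Nat.succ k, cols =>
      if cols = [] ∨ cols.any (fun c => c.isEmpty) then []
      else (cols.map (fun c => c.headI)) :: pyZipStar k (cols.map (fun c => c.tail))

def transform_column_years_in_codes_alt (base_list : List String) (years : List String) : List String :=
  if years = [] then base_list else
  match PySem.List.pyGet? base_list 0 with
  | none => base_list            -- base_list[0] IndexError, outside Pre_
  | some first =>
    let n := PySem.Str.len first
    if n ≠ 12 ∧ n ≠ 8 then base_list   -- raise ValueError, outside Pre_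
    else
      let cols := base_list.map (fun e =>
        if n = 12 ∧ PySem.Str.strIsdigit (PySem.Str.slice e (some 9) (some 10)) = true then
          years.map (fun y => PySem.Str.join "" [PySem.Str.slice e (some 0) (some 9), y,
            String.ofList [(PySem.Str.pyGet? e 11).getD ' ']])
        else if n = 8 ∧ PySem.Str.strIsdigit (PySem.Str.slice e (some 5) (some 6)) = true
                 ∧ PySem.Str.isIn "DPETG" e = false then
          years.map (fun y => PySem.Str.join "" [PySem.Str.slice e (some 0) (some 5), y,
            String.ofList [(PySem.Str.pyGet? e 7).getD ' ']])
        else List.replicate years.length e)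
      base_list ++ (pyZipStar years.length cols).flatten

-- ===== PRECONDITION & SPEC =====
-- Pre_ excludes exactly the inputs where Python A raises: nonempty years with an empty base_list
-- (IndexError on base_list[0]), a first element whose length is neither 12 nor 8 (NameError: new_list
-- undefined), or an eligible element too short for the single-character index (IndexError).
def Pre_transform_column_years_in_codes (base_list : List String) (years : List String) : Prop :=
  years = [] ∨ (base_list ≠ [] ∧
    ((PySem.Str.len base_list.headI = 12 ∧
        ∀ e ∈ base_list, PySem.Str.strIsdigit (PySem.Str.slice e (some 9) (some 10)) = true → 12 ≤ PySem.Str.len e) ∨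
     (PySem.Str.len base_list.headI = 8 ∧
        ∀ e ∈ base_list, (PySem.Str.strIsdigit (PySem.Str.slice e (some 5) (some 6)) = true ∧ PySem.Str.isIn "DPETG" e = false) → 8 ≤ PySem.Str.len e)))
instance (base_list : List String) (years : List String) : Decidable (Pre_transform_column_years_in_codes base_list years) := by unfold Pre_transform_column_years_in_codes; infer_instance

def pvWitness_transform_column_years_in_codes : List String × List String := (["ABCDEFGHI90X", "ABCDEFGHIJKL"], ["23", "24"])

def Spec_transform_column_years_in_codes (base_list : List String) (years : List String) (out : List String) : Prop := out = transform_column_years_in_codes_alt base_list years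
instance (base_list : List String) (years : List String) (out : List String) : Decidable (Spec_transform_column_years_in_codes base_list years out) := by unfold Spec_transform_column_years_in_codes; infer_instance

-- ===== CLAIM (what is proved, stated in full; the proofs are below) =====
def Claim_equal_transform_column_years_in_codes : Prop := ∀ (base_list : List String) (years : List String), Dom_transform_column_years_in_codes base_list years → Pre_transform_column_years_in_codes base_list years → Spec_transform_column_years_in_codes base_list years (transform_column_years_in_codes base_list years)

-- ===== LEMMAS AND PROOFS =====

-- A's loop, when a branch fires every step, appends F year each iteration (the carried Option is overwritten).
theorem fst_foldl_pair_overwrite (F : String → List String) (ys : List String) :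
    ∀ (acc : List String) (s : Option (List String)),
      (ys.foldl (fun (st : List String × Option (List String)) y =>
          (st.1 ++ (some (F y)).getD [], some (F y))) (acc, s)).1
        = ys.foldl (fun a y => a ++ F y) acc := by
  induction ys with
  | nil => intro acc s; rfl
  | cons y ys ih => intro acc s; simpa using ih (acc ++ F y) (some (F y))

-- A's loop when neither branch ever fires: the carried none contributes nothing.
theorem fst_foldl_pair_none (ys : List String) :
    ∀ (acc : List String),
      (ys.foldl (fun (st : List String × Option (List String)) _ =>
          (st.1 ++ st.2.getD [], st.2)) (acc, (none : Option (List String)))).1 = acc := by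
  induction ys with
  | nil => intro acc; rfl
  | cons y ys ih => intro acc; simpa using ih acc

theorem foldl_append_eq_flatten (F : String → List String) (ys : List String) :
    ∀ (acc : List String), ys.foldl (fun a y => a ++ F y) acc = acc ++ (ys.map F).flatten := by
  induction ys with
  | nil => intro acc; simp
  | cons y ys ih => intro acc; simp [ih]

theorem replicate_eq_map_const (ys : List String) (e : String) :
    List.replicate ys.length e = ys.map (fun _ => e) := by
  induction ys with
  | nil => rfl
  | cons y ys ih => rw [List.length_cons, List.replicate_succ, ih, List.map_cons]

-- Transposing a rectangle of columns (one column per element, one entry per year)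
-- gives the year-major rows.
theorem pyZipStar_rect (G : String → String → String) (ys : List String) :
    ∀ (l : List String), l ≠ [] →
      pyZipStar ys.length (l.map (fun e => ys.map (G e)))
        = ys.map (fun y => l.map (fun e => G e y)) := by
  induction ys with
  | nil => intro l _; rfl
  | cons y ys ih =>
    intro l hl
    show pyZipStar (ys.length + 1) _ = _
    rw [pyZipStar]
    rw [if_neg]
    · simp only [List.map_map, Function.comp_def]
      have hh : l.map (fun x => ((y :: ys).map (G x)).headI) = l.map (fun x => G x y) :=
        List.map_congr_left fun x _ => rfl
      have ht : l.map (fun x => ((y :: ys).map (G x)).tail) = l.map (fun x => ys.map (G x)) :=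
        List.map_congr_left fun x _ => rfl
      rw [hh, ht, ih l hl]
      rfl
    · rintro (h | h)
      · exact hl (by simpa using h)
      · rw [List.any_map] at h
        simp [Function.comp] at h

theorem alt_first_none (base_list : List String) (y : String) (ys : List String)
    (h0 : PySem.List.pyGet? base_list 0 = none) :
    transform_column_years_in_codes_alt base_list (y :: ys) = base_list := by
  unfold transform_column_years_in_codes_alt
  rw [if_neg (by simp)]
  simp only [h0]

theorem alt_bad_len (base_list : List String) (first : String) (y : String) (ys : List String)
    (h0 : PySem.List.pyGet? base_list 0 = some first)
    (h12 : ¬ PySem.Str.len first = 12) (h8 : ¬ PySem.Str.len first = 8) :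
    transform_column_years_in_codes_alt base_list (y :: ys) = base_list := by
  unfold transform_column_years_in_codes_alt
  rw [if_neg (by simp)]
  simp only [h0]
  exact if_pos ⟨h12, h8⟩

theorem alt_len12 (base_list : List String) (first : String) (y : String) (ys : List String)
    (h0 : PySem.List.pyGet? base_list 0 = some first)
    (h12 : PySem.Str.len first = 12) :
    transform_column_years_in_codes_alt base_list (y :: ys)
      = base_list ++ ((y :: ys).map (fun yr => base_list.map (fun e =>
          if PySem.Str.strIsdigit (PySem.Str.slice e (some 9) (some 10)) then
            PySem.Str.join "" [PySem.Str.slice e (some 0) (some 9), yr,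
              String.ofList [(PySem.Str.pyGet? e 11).getD ' ']]
          else e))).flatten := by
  have hbl : base_list ≠ [] :=
    List.ne_nil_of_mem (PySem.List.mem_of_pyGet?_eq_some base_list h0)
  unfold transform_column_years_in_codes_alt
  rw [if_neg (by simp)]
  simp only [h0]
  rw [if_neg (fun h => h.1 h12)]
  congr 1
  have hcols : base_list.map (fun e =>
      if PySem.Str.len first = 12 ∧ PySem.Str.strIsdigit (PySem.Str.slice e (some 9) (some 10)) = true then
        (y :: ys).map (fun yr => PySem.Str.join "" [PySem.Str.slice e (some 0) (some 9), yr,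
          String.ofList [(PySem.Str.pyGet? e 11).getD ' ']])
      else if PySem.Str.len first = 8 ∧ PySem.Str.strIsdigit (PySem.Str.slice e (some 5) (some 6)) = true
               ∧ PySem.Str.isIn "DPETG" e = false then
        (y :: ys).map (fun yr => PySem.Str.join "" [PySem.Str.slice e (some 0) (some 5), yr,
          String.ofList [(PySem.Str.pyGet? e 7).getD ' ']])
      else List.replicate (y :: ys).length e)
      = base_list.map (fun e => (y :: ys).map (fun yr =>
          if PySem.Str.strIsdigit (PySem.Str.slice e (some 9) (some 10)) then
            PySem.Str.join "" [PySem.Str.slice e (some 0) (some 9), yr,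
              String.ofList [(PySem.Str.pyGet? e 11).getD ' ']]
          else e)) := by
    refine List.map_congr_left (fun e _ => ?_)
    by_cases hc : PySem.Str.strIsdigit (PySem.Str.slice e (some 9) (some 10)) = true
    · rw [if_pos ⟨h12, hc⟩]
      refine (List.map_congr_left (fun yr _ => ?_)).symm
      exact if_pos hc
    · rw [if_neg (fun h => hc h.2),
          if_neg (fun h => by rw [h12] at h; exact absurd h.1 (by decide))]
      rw [replicate_eq_map_const]
      refine (List.map_congr_left (fun yr _ => ?_)).symm
      exact if_neg hc
  rw [hcols, pyZipStar_rect _ _ _ hbl]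

theorem alt_len8 (base_list : List String) (first : String) (y : String) (ys : List String)
    (h0 : PySem.List.pyGet? base_list 0 = some first)
    (h8 : PySem.Str.len first = 8) :
    transform_column_years_in_codes_alt base_list (y :: ys)
      = base_list ++ ((y :: ys).map (fun yr => base_list.map (fun e =>
          if PySem.Str.strIsdigit (PySem.Str.slice e (some 5) (some 6)) && !(PySem.Str.isIn "DPETG" e) then
            PySem.Str.join "" [PySem.Str.slice e (some 0) (some 5), yr,
              String.ofList [(PySem.Str.pyGet? e 7).getD ' ']]
          else e))).flatten := by
  have hbl : base_list ≠ [] :=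
    List.ne_nil_of_mem (PySem.List.mem_of_pyGet?_eq_some base_list h0)
  have h12 : ¬ PySem.Str.len first = 12 := by rw [h8]; decide
  unfold transform_column_years_in_codes_alt
  rw [if_neg (by simp)]
  simp only [h0]
  rw [if_neg (fun h => h.2 h8)]
  congr 1
  have hcols : base_list.map (fun e =>
      if PySem.Str.len first = 12 ∧ PySem.Str.strIsdigit (PySem.Str.slice e (some 9) (some 10)) = true then
        (y :: ys).map (fun yr => PySem.Str.join "" [PySem.Str.slice e (some 0) (some 9), yr,
          String.ofList [(PySem.Str.pyGet? e 11).getD ' ']])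
      else if PySem.Str.len first = 8 ∧ PySem.Str.strIsdigit (PySem.Str.slice e (some 5) (some 6)) = true
               ∧ PySem.Str.isIn "DPETG" e = false then
        (y :: ys).map (fun yr => PySem.Str.join "" [PySem.Str.slice e (some 0) (some 5), yr,
          String.ofList [(PySem.Str.pyGet? e 7).getD ' ']])
      else List.replicate (y :: ys).length e)
      = base_list.map (fun e => (y :: ys).map (fun yr =>
          if PySem.Str.strIsdigit (PySem.Str.slice e (some 5) (some 6)) && !(PySem.Str.isIn "DPETG" e) then
            PySem.Str.join "" [PySem.Str.slice e (some 0) (some 5), yr,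
              String.ofList [(PySem.Str.pyGet? e 7).getD ' ']]
          else e)) := by
    refine List.map_congr_left (fun e _ => ?_)
    rw [if_neg (fun h => h12 h.1)]
    by_cases hc : (PySem.Str.strIsdigit (PySem.Str.slice e (some 5) (some 6)) && !(PySem.Str.isIn "DPETG" e)) = true
    · rw [Bool.and_eq_true, Bool.not_eq_true'] at hc
      rw [if_pos ⟨h8, hc.1, hc.2⟩]
      refine (List.map_congr_left (fun yr _ => ?_)).symm
      rw [if_pos (by rw [Bool.and_eq_true, Bool.not_eq_true']; exact hc)]
    · rw [if_neg ?hn]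
      · rw [replicate_eq_map_const]
        exact (List.map_congr_left (fun yr _ => by rw [if_neg hc])).symm
      · rintro ⟨-, hd, hi⟩
        exact hc (by rw [Bool.and_eq_true, Bool.not_eq_true']; exact ⟨hd, hi⟩)
  rw [hcols, pyZipStar_rect _ _ _ hbl]

theorem transform_column_years_in_codes_eq (base_list : List String) (years : List String) :
    transform_column_years_in_codes base_list years
      = transform_column_years_in_codes_alt base_list years := by
  cases hy : years with
  | nil => rfl
  | cons y ys =>
    unfold transform_column_years_in_codes
    simp only [List.nil_append]
    cases h0 : PySem.List.pyGet? base_list 0 with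
    | none =>
      rw [alt_first_none base_list y ys h0]
      simp only [Option.map_none, reduceCtorEq, ite_false]
      exact fst_foldl_pair_none (y :: ys) base_list
    | some first =>
      simp only [Option.map_some, Option.some.injEq]
      by_cases h12 : PySem.Str.len first = 12
      · rw [alt_len12 base_list first y ys h0 h12]
        simp only [h12, Int.reduceEq, ite_true, ite_false]
        rw [fst_foldl_pair_overwrite, foldl_append_eq_flatten]
      · by_cases h8 : PySem.Str.len first = 8
        · rw [alt_len8 base_list first y ys h0 h8]
          simp only [h8, Int.reduceEq, ite_true, ite_false]
          rw [fst_foldl_pair_overwrite, foldl_append_eq_flatten]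
        · rw [alt_bad_len base_list first y ys h0 h12 h8]
          simp only [h12, h8, ite_false]
          exact fst_foldl_pair_none (y :: ys) base_list

-- ===== VERDICT (by name: the statement is the Claim_ definition above) =====
theorem transform_column_years_in_codes_spec : Claim_equal_transform_column_years_in_codes := by
  intro base_list years _ _
  unfold Spec_transform_column_years_in_codes
  exact transform_column_years_in_codes_eq base_list years
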